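-- pv_equiv track=rewrite | github.com/Qutrit-Emulator/Qutrit-Emulator | upgraderesources/futureharvest.py | decode_trits
-- ===== SOURCE A (Python) =====
-- TRIT_MAP = {0: '00', 1: '01', 2: '10'} # Ternary to Binary Decoding
--
-- def decode_trits(byte_stream):
--     """Decodes entropy using the Reflector/Reflected symmetry."""
--     decoded_bits = ""
--     for byte in byte_stream:
--         # Map byte to trits (Mod 3) then back to Binary logic
--         trit = byte % 3
--         decoded_bits += TRIT_MAP[trit]
--
--     # Group bits into 8-bit potential opcodes
--     # We only take the FIRST valid byte as the Opcode, the rest is the Machine Code body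
--     if len(decoded_bits) >= 8:
--         op_val = int(decoded_bits[:8], 2)
--         return op_val
--     return None
-- ===== SOURCE B (Python) =====
-- TRIT_MAP = {0: '00', 1: '01', 2: '10'} # Ternary to Binary Decoding
--
-- def decode_trits(byte_stream):
--     """Horner base-4 accumulation over only the first four bytes; no bit string."""
--     if len(byte_stream) < 4:
--         return None
--     op_val = 0
--     for byte in byte_stream[:4]:
--         op_val = op_val * 4 + int(TRIT_MAP[byte % 3], 2)
--     return op_val
-- ===== Notes on version B (the rewrite author's own statement) =====
-- stated objective: faster
-- what changed: B inspects only the first four bytes and accumulates the opcode as an integer with Horner base-4 steps, instead of A's building an ever-growing bit string over the whole stream and then parsing its 8-char prefix with int(.,2).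
import Mathlib
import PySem

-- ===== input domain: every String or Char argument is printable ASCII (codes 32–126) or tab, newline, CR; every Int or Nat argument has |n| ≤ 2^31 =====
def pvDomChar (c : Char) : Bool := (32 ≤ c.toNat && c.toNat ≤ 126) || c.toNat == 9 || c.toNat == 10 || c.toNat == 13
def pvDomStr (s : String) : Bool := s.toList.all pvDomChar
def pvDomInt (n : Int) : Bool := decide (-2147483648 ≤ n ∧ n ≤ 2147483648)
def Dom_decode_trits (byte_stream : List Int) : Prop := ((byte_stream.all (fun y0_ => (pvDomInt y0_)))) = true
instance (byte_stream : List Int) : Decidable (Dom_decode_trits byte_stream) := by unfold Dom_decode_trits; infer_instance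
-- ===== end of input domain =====

-- B replaces A's whole-stream bit-string buildup + int(.,2) parse by a Horner base-4
-- integer accumulator over only the first four bytes (objective: faster).

-- ===== PORT A =====
-- TRIT_MAP[t] as a list of bit characters (t is always byte % 3 ∈ {0,1,2}, so no KeyError).
def tritChars (t : Int) : List Char :=
  if t = 0 then ['0', '0'] else if t = 1 then ['0', '1'] else ['1', '0']

-- int(s, 2) on a string of '0'/'1' characters, ported by hand (exact on such strings,
-- which is all A ever feeds it).
def parseBin (acc : Int) (s : List Char) : Int :=
  s.foldl (fun a c => a * 2 + (if c = '1' then 1 else 0)) acc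

def decode_trits (byte_stream : List Int) : Option Int :=
  let decoded_bits : List Char :=
    byte_stream.foldl (fun acc byte => acc ++ tritChars (PySem.Int.mod byte 3)) []
  if 8 ≤ decoded_bits.length then some (parseBin 0 (decoded_bits.take 8)) else none

-- ===== PORT B =====
-- int(TRIT_MAP[t], 2) as a direct value (t is always byte % 3 ∈ {0,1,2}).
def tritVal (t : Int) : Int := if t = 0 then 0 else if t = 1 then 1 else 2

def decode_trits_alt (byte_stream : List Int) : Option Int :=
  if byte_stream.length < 4 then none
  else
    some ((byte_stream.take 4).foldl
      (fun op_val byte => op_val * 4 + tritVal (PySem.Int.mod byte 3)) 0)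

-- ===== PRECONDITION & SPEC =====
def Spec_decode_trits (byte_stream : List Int) (out : Option Int) : Prop := out = decode_trits_alt byte_stream
instance (byte_stream : List Int) (out : Option Int) : Decidable (Spec_decode_trits byte_stream out) := by unfold Spec_decode_trits; infer_instance

-- ===== CLAIM (what is proved, stated in full; the proofs are below) =====
def Claim_equal_decode_trits : Prop := ∀ (byte_stream : List Int), Dom_decode_trits byte_stream → Spec_decode_trits byte_stream (decode_trits byte_stream)

-- ===== LEMMAS AND PROOFS =====

theorem mod3_cases (x : Int) :
    PySem.Int.mod x 3 = 0 ∨ PySem.Int.mod x 3 = 1 ∨ PySem.Int.mod x 3 = 2 := by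
  rw [PySem.Int.mod_eq_emod_of_pos (by norm_num : (0:Int) < 3)]
  omega

theorem tritChars_len (t : Int) : (tritChars t).length = 2 := by
  unfold tritChars; split_ifs <;> rfl

theorem bits_flatMap (l : List Int) :
    l.foldl (fun acc byte => acc ++ tritChars (PySem.Int.mod byte 3)) [] =
      l.flatMap (fun byte => tritChars (PySem.Int.mod byte 3)) := by
  simpa using PySem.List.foldl_append_eq_flatMap
    (l := l) (g := fun byte => tritChars (PySem.Int.mod byte 3)) (acc := [])

theorem bits_length (l : List Int) :
    (l.flatMap (fun byte => tritChars (PySem.Int.mod byte 3))).length = 2 * l.length := by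
  induction l with
  | nil => rfl
  | cons a l ih => simp [List.flatMap_cons, tritChars_len]; omega

-- one Horner step: parsing two more bits of tritChars t multiplies by 4 and adds tritVal t
theorem parseBin_trit (acc : Int) (t : Int) (ht : t = 0 ∨ t = 1 ∨ t = 2) (s : List Char) :
    parseBin acc (tritChars t ++ s) = parseBin (acc * 4 + tritVal t) s := by
  rcases ht with h | h | h <;>
    rw [h] <;> simp [tritChars, tritVal, parseBin] <;> congr 1 <;> ring

-- ===== VERDICT (by name: the statement is the Claim_ definition above) =====
theorem decode_trits_spec : Claim_equal_decode_trits := by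
  intro l _
  show decode_trits l = decode_trits_alt l
  unfold decode_trits decode_trits_alt
  rw [bits_flatMap]
  match l with
  | [] => rfl
  | [a] => simp [List.flatMap, tritChars_len]
  | [a, b] => simp [List.flatMap, tritChars_len]
  | [a, b, c] => simp [List.flatMap, tritChars_len]
  | a :: b :: c :: d :: rest =>
    have hlen : (((a :: b :: c :: d :: rest).flatMap
        (fun byte => tritChars (PySem.Int.mod byte 3))).length) = 2 * (rest.length + 4) := by
      rw [bits_length]; simp
    have h8 : (8 ≤ ((a :: b :: c :: d :: rest).flatMap
        (fun byte => tritChars (PySem.Int.mod byte 3))).length) := by omega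
    rw [if_pos h8, if_neg (by simp)]
    -- the first 8 bits are exactly the trit chars of the first four bytes
    have htake : (((a :: b :: c :: d :: rest).flatMap
          (fun byte => tritChars (PySem.Int.mod byte 3))).take 8) =
        tritChars (PySem.Int.mod a 3) ++ tritChars (PySem.Int.mod b 3) ++
          tritChars (PySem.Int.mod c 3) ++ tritChars (PySem.Int.mod d 3) := by
      rcases mod3_cases a with ha | ha | ha <;> rcases mod3_cases b with hb | hb | hb <;>
        rcases mod3_cases c with hc | hc | hc <;> rcases mod3_cases d with hd | hd | hd <;>
        rw [List.flatMap_cons, List.flatMap_cons, List.flatMap_cons, List.flatMap_cons,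
            ha, hb, hc, hd] <;> simp [tritChars]
    rw [htake]
    rw [List.append_assoc, List.append_assoc,
      parseBin_trit _ _ (mod3_cases a), parseBin_trit _ _ (mod3_cases b),
      parseBin_trit _ _ (mod3_cases c), ← List.append_nil (tritChars (PySem.Int.mod d 3)),
      parseBin_trit _ _ (mod3_cases d)]
    simp [parseBin, List.take, List.foldl]
    try ring
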